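-- pv_equiv track=rewrite | github.com/ccctw-ma/leetcode | src/Medium/DynamicTest/minFlipsMonoIncr.py | minFlipsMonoIncr
-- ===== SOURCE A (Python) =====
-- def minFlipsMonoIncr(s: str) -> int:
--     zero, one = 0, 0
--     for c in s:
--         if c == '1':
--             one = min(one, zero)
--             zero = zero + 1
--         else:
--             one = one + 1
--
--     return min(zero, one)
-- ===== SOURCE B (Python) =====
-- def minFlipsMonoIncr(s: str) -> int:
--     # prefix/suffix split scan: best split makes the prefix all zeros and the suffix all ones
--     ones = 0
--     zeros = sum(c != '1' for c in s)
--     best = zeros  # split before the first char: flip every non-'1' to '1'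
--     for c in s:
--         if c == '1':
--             ones += 1
--         else:
--             zeros -= 1
--         best = min(best, ones + zeros)
--     return best
-- ===== Notes on version B (the rewrite author's own statement) =====
-- stated objective: alternative
-- what changed: Replaces A's two-counter DP (one/zero with min-resets) by an explicit split-point scan: precompute the non-'1' count, then one pass maintaining ones-in-prefix and zeros-in-suffix, taking the minimum of ones+zeros over all split points.
import Mathlib
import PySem

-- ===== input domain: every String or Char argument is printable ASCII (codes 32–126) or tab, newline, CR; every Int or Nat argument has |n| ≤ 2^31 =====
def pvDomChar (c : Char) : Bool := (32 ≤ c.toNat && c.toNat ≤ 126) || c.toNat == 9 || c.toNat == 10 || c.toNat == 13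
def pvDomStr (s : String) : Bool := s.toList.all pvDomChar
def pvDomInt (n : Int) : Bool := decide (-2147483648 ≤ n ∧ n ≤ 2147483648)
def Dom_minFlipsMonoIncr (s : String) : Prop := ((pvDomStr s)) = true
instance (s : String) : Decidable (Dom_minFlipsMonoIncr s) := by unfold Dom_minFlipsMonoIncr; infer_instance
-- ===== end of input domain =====

-- B replaces A's two-counter DP by a split-point scan (ones in prefix + zeros in suffix); same O(n) cost, different decomposition.

-- ===== PORT A =====
-- loop body: if c == '1': one = min(one, zero); zero = zero + 1  else: one = one + 1   (state = (zero, one))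
def stepA (st : Int × Int) (c : Char) : Int × Int :=
  if c = '1' then (st.1 + 1, min st.2 st.1) else (st.1, st.2 + 1)

def minFlipsMonoIncr (s : String) : Int :=
  let st := s.toList.foldl stepA (0, 0)
  min st.1 st.2

-- ===== PORT B =====
-- loop body: if c == '1': ones += 1  else: zeros -= 1;  best = min(best, ones + zeros)   (state = (ones, zeros, best))
def stepB (st : Int × Int × Int) (c : Char) : Int × Int × Int :=
  let oz := if c = '1' then (st.1 + 1, st.2.1) else (st.1, st.2.1 - 1)
  (oz.1, oz.2, min st.2.2 (oz.1 + oz.2))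

def minFlipsMonoIncr_alt (s : String) : Int :=
  let zeros0 : Int := s.toList.foldl (fun acc c => acc + (if c ≠ '1' then 1 else 0)) 0
  let st := s.toList.foldl stepB (0, zeros0, zeros0)
  st.2.2

-- ===== PRECONDITION & SPEC =====
def Spec_minFlipsMonoIncr (s : String) (out : Int) : Prop := out = minFlipsMonoIncr_alt s
instance (s : String) (out : Int) : Decidable (Spec_minFlipsMonoIncr s out) := by unfold Spec_minFlipsMonoIncr; infer_instance

-- ===== CLAIM (what is proved, stated in full; the proofs are below) =====
def Claim_equal_minFlipsMonoIncr : Prop := ∀ (s : String), Dom_minFlipsMonoIncr s → Spec_minFlipsMonoIncr s (minFlipsMonoIncr s)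

-- ===== LEMMAS AND PROOFS =====

-- number of non-'1' characters
def zerosL : List Char → Int
  | [] => 0
  | c :: l => (if c = '1' then 0 else 1) + zerosL l

-- the common mathematical value: min over all split points of (ones in prefix + non-'1's in suffix)
def ML : List Char → Int
  | [] => 0
  | c :: l => if c = '1' then min (zerosL l) (1 + ML l) else ML l

-- min over the ±1 path sums taken by B's running candidate, over nonempty prefixes of c :: l
def RL : Char → List Char → Int
  | c, [] => if c = '1' then 1 else -1
  | c, c' :: l => (if c = '1' then 1 else -1) + min 0 (RL c' l)

theorem ML_le_zerosL (l : List Char) : ML l ≤ zerosL l := by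
  induction l with
  | nil => simp [ML, zerosL]
  | cons c l ih =>
    simp only [ML, zerosL]
    split <;> omega

theorem zeros0_eq (l : List Char) (acc : Int) :
    l.foldl (fun acc c => acc + (if c ≠ '1' then 1 else 0)) acc = acc + zerosL l := by
  induction l generalizing acc with
  | nil => simp [zerosL]
  | cons c l ih =>
    rw [List.foldl_cons, ih]
    by_cases hc : c = '1' <;> (simp [zerosL, hc]; try omega)

theorem stepA_one (st : Int × Int) (c : Char) (h : c = '1') :
    stepA st c = (st.1 + 1, min st.2 st.1) := by simp [stepA, h]

theorem stepA_zero (st : Int × Int) (c : Char) (h : ¬ c = '1') :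
    stepA st c = (st.1, st.2 + 1) := by simp [stepA, h]

theorem stepB_one (st : Int × Int × Int) (c : Char) (h : c = '1') :
    stepB st c = (st.1 + 1, st.2.1, min st.2.2 (st.1 + 1 + st.2.1)) := by simp [stepB, h]

theorem stepB_zero (st : Int × Int × Int) (c : Char) (h : ¬ c = '1') :
    stepB st c = (st.1, st.2.1 - 1, min st.2.2 (st.1 + (st.2.1 - 1))) := by simp [stepB, h]

theorem foldA_spec (l : List Char) (z o : Int) :
    min (l.foldl stepA (z, o)).1 (l.foldl stepA (z, o)).2
      = min (o + zerosL l) (z + ML l) := by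
  induction l generalizing z o with
  | nil => simp only [List.foldl, zerosL, ML]; omega
  | cons c l ih =>
    by_cases hc : c = '1'
    · rw [List.foldl_cons, stepA_one _ _ hc, ih]
      simp only [zerosL, ML, hc, min_def]
      split_ifs <;> omega
    · rw [List.foldl_cons, stepA_zero _ _ hc, ih]
      simp only [zerosL, ML, if_neg hc, min_def]
      split_ifs <;> omega

theorem foldB_spec (l : List Char) (c : Char) (a z best : Int) :
    ((c :: l).foldl stepB (a, z, best)).2.2 = min best (a + z + RL c l) := by
  induction l generalizing c a z best with
  | nil =>
    by_cases hc : c = '1'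
    · rw [List.foldl_cons, stepB_one _ _ hc]
      simp only [List.foldl, RL, hc, min_def]
      split_ifs <;> omega
    · rw [List.foldl_cons, stepB_zero _ _ hc]
      simp only [List.foldl, RL, if_neg hc, min_def]
      split_ifs <;> omega
  | cons c' l ih =>
    by_cases hc : c = '1'
    · rw [List.foldl_cons, stepB_one _ _ hc, ih]
      simp only [RL, hc, min_def]
      split_ifs <;> omega
    · rw [List.foldl_cons, stepB_zero _ _ hc, ih]
      simp only [RL, if_neg hc, min_def]
      split_ifs <;> omega

theorem RL_ML (l : List Char) (c : Char) :
    min (zerosL (c :: l)) (zerosL (c :: l) + RL c l) = ML (c :: l) := by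
  induction l generalizing c with
  | nil =>
    by_cases hc : c = '1' <;> simp [zerosL, ML, RL, hc]
  | cons c' l ih =>
    have h1 := ih c'
    have h2 := ML_le_zerosL (c' :: l)
    by_cases hc : c = '1' <;>
      simp only [zerosL, ML, RL, hc, min_def] at * <;> split_ifs at * <;> omega

-- ===== VERDICT (by name: the statement is the Claim_ definition above) =====
theorem minFlipsMonoIncr_spec : Claim_equal_minFlipsMonoIncr := by
  intro s _
  show minFlipsMonoIncr s = minFlipsMonoIncr_alt s
  unfold minFlipsMonoIncr minFlipsMonoIncr_alt
  rw [zeros0_eq]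
  cases hl : s.toList with
  | nil => simp [zerosL]
  | cons c l =>
    rw [foldB_spec, foldA_spec]
    have hR := RL_ML l c
    have hz := ML_le_zerosL (c :: l)
    simp only [zerosL] at *
    omega
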